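-- pv_equiv track=rewrite | github.com/Melodiz/dailycode | Algorithms/some_intern_contests/tinkoff_winter/task_7/brute.py | solve
-- ===== SOURCE A (Python) =====
-- def solve(n, k, nums):
--     MOD = 998244353
--
--     def f(p):
--         result = 0
--         for i in range(n):
--             for j in range(i + 1, n):
--                 sum_pair = nums[i] + nums[j]
--                 result += pow(sum_pair, p, MOD)
--         return result % MOD
--
--     return [f(p) for p in range(1, k + 1)]
-- ===== SOURCE B (Python) =====
-- def solve(n, k, nums):
--     MOD = 998244353
--     K = k if k > 0 else 0
--     if K == 0:
--         return []
--     res = [0] * K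
--     for i in range(n):
--         for j in range(i + 1, n):
--             s = (nums[i] + nums[j]) % MOD
--             cur = 1
--             for idx in range(K):
--                 cur = cur * s % MOD
--                 res[idx] = (res[idx] + cur) % MOD
--     return res
-- ===== Notes on version B (the rewrite author's own statement) =====
-- stated objective: faster
-- what changed: Inverts the loop nest: instead of one pair scan per exponent with a modular exponentiation for every (pair, p), B walks each pair once and accumulates all k powers of its sum with a single running product cur = cur*s % MOD into a result array, eliminating every pow() call (timing: 3.26x at the largest size where both finish every input).
import Mathlib
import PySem

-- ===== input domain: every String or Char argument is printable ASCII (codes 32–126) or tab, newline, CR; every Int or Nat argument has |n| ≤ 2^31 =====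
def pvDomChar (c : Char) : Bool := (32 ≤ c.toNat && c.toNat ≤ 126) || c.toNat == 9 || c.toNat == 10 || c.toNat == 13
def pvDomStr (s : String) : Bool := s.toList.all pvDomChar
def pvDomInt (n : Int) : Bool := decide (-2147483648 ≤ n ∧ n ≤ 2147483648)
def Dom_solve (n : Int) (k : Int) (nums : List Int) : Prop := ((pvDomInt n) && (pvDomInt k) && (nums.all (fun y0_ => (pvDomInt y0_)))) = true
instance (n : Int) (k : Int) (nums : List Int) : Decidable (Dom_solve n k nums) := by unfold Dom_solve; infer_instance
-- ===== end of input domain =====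

-- B inverts A's loop nest: one walk over the pairs, accumulating all k powers of each pair sum
-- with a running product into a result array, instead of a pow() call per (pair, exponent).

-- ===== PORT A =====
def solve (n : Int) (k : Int) (nums : List Int) : List Int :=
  (PySem.List.pyRange 1 (k + 1) 1).map (fun p =>
    ((PySem.List.pyRange 0 n 1).foldl (fun result i =>
        (PySem.List.pyRange (i + 1) n 1).foldl (fun result j =>
          result + PySem.Int.powMod
            (PySem.List.pyGetD nums i 0 + PySem.List.pyGetD nums j 0) p.toNat 998244353)
          result)
      0) % 998244353)

-- ===== PORT B =====
def solve_alt (n : Int) (k : Int) (nums : List Int) : List Int :=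
  let MOD : Int := 998244353
  let K : Int := if k > 0 then k else 0
  if K = 0 then []
  else
    (PySem.List.pyRange 0 n 1).foldl (fun res i =>
        (PySem.List.pyRange (i + 1) n 1).foldl (fun res j =>
          let s := (PySem.List.pyGetD nums i 0 + PySem.List.pyGetD nums j 0) % MOD
          ((PySem.List.pyRange 0 K 1).foldl
            (fun (st : Int × List Int) idx =>
              let cur := st.1 * s % MOD
              (cur, PySem.List.pySetD st.2 idx
                ((PySem.List.pyGetD st.2 idx 0 + cur) % MOD)))
            (1, res)).2)
          res)
      (List.replicate K.toNat 0)

-- ===== PRECONDITION & SPEC =====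
-- A raises IndexError exactly when it indexes past nums, i.e. when k ≥ 1, n ≥ 2 and n > len(nums);
-- Pre_solve excludes exactly those inputs (A returns normally everywhere else).
def Pre_solve (n : Int) (k : Int) (nums : List Int) : Prop :=
  n ≤ (nums.length : Int) ∨ k < 1 ∨ n < 2
instance (n : Int) (k : Int) (nums : List Int) : Decidable (Pre_solve n k nums) := by
  unfold Pre_solve; infer_instance
def pvWitness_solve : Int × Int × List Int := (4, 3, [3, -5, 7, 2])

def Spec_solve (n : Int) (k : Int) (nums : List Int) (out : List Int) : Prop := out = solve_alt n k nums
instance (n : Int) (k : Int) (nums : List Int) (out : List Int) : Decidable (Spec_solve n k nums out) := by unfold Spec_solve; infer_instance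

-- ===== CLAIM (what is proved, stated in full; the proofs are below) =====
def Claim_equal_solve : Prop := ∀ (n : Int) (k : Int) (nums : List Int), Dom_solve n k nums → Pre_solve n k nums → Spec_solve n k nums (solve n k nums)
-- ===== LEMMAS AND PROOFS =====

abbrev R9 := ZMod 998244353

lemma phi_emod (x : Int) : ((x % 998244353 : Int) : R9) = (x : R9) := by
  have h := ZMod.intCast_mod x 998244353
  simpa using h

lemma emod_eq_of_cast {x y : Int} (h : (x : R9) = (y : R9)) :
    x % 998244353 = y % 998244353 := by
  have := (ZMod.intCast_eq_intCast_iff x y 998244353).mp h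
  simpa [Int.ModEq] using this

def Abig (n : Int) (nums : List Int) (p : Nat) : Int :=
  (PySem.List.pyRange 0 n 1).foldl (fun result i =>
      (PySem.List.pyRange (i + 1) n 1).foldl (fun result j =>
        result + PySem.Int.powMod
          (PySem.List.pyGetD nums i 0 + PySem.List.pyGetD nums j 0) p 998244353)
        result)
    0

lemma Abig_sum (n : Int) (nums : List Int) (p : Nat) :
    Abig n nums p = ((PySem.List.pyRange 0 n 1).map (fun i =>
      ((PySem.List.pyRange (i + 1) n 1).map (fun j =>
        PySem.Int.powMod (PySem.List.pyGetD nums i 0 + PySem.List.pyGetD nums j 0) p 998244353)).sum)).sum := by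
  unfold Abig
  simp only [PySem.List.foldl_add, zero_add]

lemma phi_powMod (s : Int) (p : Nat) :
    ((PySem.Int.powMod s p 998244353 : Int) : R9) = (s : R9) ^ p := by
  show ((PySem.Int.mod (s ^ p) 998244353 : Int) : R9) = (s : R9) ^ p
  rw [PySem.Int.mod_eq_emod_of_pos (by norm_num), phi_emod, Int.cast_pow]

lemma cast_Abig (n : Int) (nums : List Int) (p : Nat) :
    ((Abig n nums p : Int) : R9) = ((PySem.List.pyRange 0 n 1).map (fun i =>
      ((PySem.List.pyRange (i + 1) n 1).map (fun j =>
        (((PySem.List.pyGetD nums i 0 + PySem.List.pyGetD nums j 0) % 998244353 : Int) : R9) ^ p)).sum)).sum := by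
  rw [Abig_sum, Int.cast_list_sum, List.map_map]
  refine congrArg List.sum (List.map_congr_left (fun i _ => ?_))
  simp only [Function.comp_apply]
  rw [Int.cast_list_sum, List.map_map]
  refine congrArg List.sum (List.map_congr_left (fun j _ => ?_))
  simp only [Function.comp_apply]
  rw [phi_powMod, phi_emod]

-- the loop invariant of B: every cell of the result array is reduced mod 998244353
-- and its residue is the partial pair-power sum so far
def QInv (Knat : Nat) (res : List Int) (f : Nat → R9) : Prop :=
  res.length = Knat ∧ ∀ idx : Nat, idx < Knat →
    0 ≤ res.getD idx 0 ∧ res.getD idx 0 < 998244353 ∧ ((res.getD idx 0 : Int) : R9) = f idx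

lemma QInv_congr {Knat : Nat} {res : List Int} {f f' : Nat → R9}
    (h : ∀ idx : Nat, f idx = f' idx) (hq : QInv Knat res f) : QInv Knat res f' := by
  exact ⟨hq.1, fun idx hidx => by
    obtain ⟨h1, h2, h3⟩ := hq.2 idx hidx
    exact ⟨h1, h2, h3.trans (h idx)⟩⟩

lemma inner_fill (Knat : Nat) (s : Int) : ∀ (d c : Nat) (cur : Int) (res : List Int),
    Knat = c + d → res.length = Knat →
    (((PySem.List.pyRange (c : Int) (Knat : Int) 1).foldl
        (fun (st : Int × List Int) idx =>
          (st.1 * s % 998244353, PySem.List.pySetD st.2 idx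
            ((PySem.List.pyGetD st.2 idx 0 + st.1 * s % 998244353) % 998244353)))
        (cur, res)).2.length = Knat)
    ∧ (∀ idx : Nat, idx < c →
        ((PySem.List.pyRange (c : Int) (Knat : Int) 1).foldl
          (fun (st : Int × List Int) idx =>
            (st.1 * s % 998244353, PySem.List.pySetD st.2 idx
              ((PySem.List.pyGetD st.2 idx 0 + st.1 * s % 998244353) % 998244353)))
          (cur, res)).2.getD idx 0 = res.getD idx 0)
    ∧ (∀ idx : Nat, c ≤ idx → idx < Knat →
        0 ≤ ((PySem.List.pyRange (c : Int) (Knat : Int) 1).foldl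
            (fun (st : Int × List Int) idx =>
              (st.1 * s % 998244353, PySem.List.pySetD st.2 idx
                ((PySem.List.pyGetD st.2 idx 0 + st.1 * s % 998244353) % 998244353)))
            (cur, res)).2.getD idx 0
        ∧ ((PySem.List.pyRange (c : Int) (Knat : Int) 1).foldl
            (fun (st : Int × List Int) idx =>
              (st.1 * s % 998244353, PySem.List.pySetD st.2 idx
                ((PySem.List.pyGetD st.2 idx 0 + st.1 * s % 998244353) % 998244353)))
            (cur, res)).2.getD idx 0 < 998244353
        ∧ ((((PySem.List.pyRange (c : Int) (Knat : Int) 1).foldl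
            (fun (st : Int × List Int) idx =>
              (st.1 * s % 998244353, PySem.List.pySetD st.2 idx
                ((PySem.List.pyGetD st.2 idx 0 + st.1 * s % 998244353) % 998244353)))
            (cur, res)).2.getD idx 0 : Int) : R9)
          = ((res.getD idx 0 : Int) : R9) + ((cur : Int) : R9) * ((s : Int) : R9) ^ (idx + 1 - c)) := by
  intro d
  induction d with
  | zero =>
    intro c cur res hkc hlen
    have hnil : PySem.List.pyRange (c : Int) (Knat : Int) 1 = [] :=
      PySem.List.pyRange_one_eq_nil (by omega)
    rw [hnil]
    simp only [List.foldl_nil]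
    exact ⟨hlen, fun _ _ => trivial, fun idx h1 h2 => absurd h2 (by omega)⟩
  | succ d ih =>
    intro c cur res hkc hlen
    have hcons : PySem.List.pyRange (c : Int) (Knat : Int) 1
        = (c : Int) :: PySem.List.pyRange ((c : Int) + 1) (Knat : Int) 1 :=
      PySem.List.pyRange_one_cons (by omega)
    have hc1 : ((c : Int) + 1) = (((c + 1 : Nat)) : Int) := by push_cast; ring
    rw [hcons, List.foldl_cons, hc1]
    simp only [PySem.List.pyGetD_natCast, PySem.List.pySetD_natCast]
    obtain ⟨ihlen, ihlow, ihhi⟩ := ih (c + 1) (cur * s % 998244353)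
      (res.set c ((res.getD c 0 + cur * s % 998244353) % 998244353)) (by omega) (by simp [hlen])
    have hset_ne : ∀ idx : Nat, c ≠ idx →
        (res.set c ((res.getD c 0 + cur * s % 998244353) % 998244353)).getD idx 0
          = res.getD idx 0 := by
      intro idx hne
      simp [List.getD_eq_getElem?_getD, List.getElem?_set_ne hne]
    have hset_self :
        (res.set c ((res.getD c 0 + cur * s % 998244353) % 998244353)).getD c 0
          = (res.getD c 0 + cur * s % 998244353) % 998244353 := by
      simp [List.getD_eq_getElem?_getD, (by omega : c < res.length)]
    refine ⟨ihlen, ?_, ?_⟩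
    · intro idx hidx
      rw [ihlow idx (by omega), hset_ne idx (by omega)]
    · intro idx hc hK
      by_cases hidx : idx = c
      · subst hidx
        rw [ihlow idx (by omega), hset_self]
        refine ⟨Int.emod_nonneg _ (by norm_num), Int.emod_lt_of_pos _ (by norm_num), ?_⟩
        rw [phi_emod, Int.cast_add, phi_emod, Int.cast_mul]
        have he : idx + 1 - idx = 1 := by omega
        rw [he, pow_one]
      · obtain ⟨h1, h2, h3⟩ := ihhi idx (by omega) hK
        refine ⟨h1, h2, ?_⟩
        rw [h3, hset_ne idx (by omega), phi_emod, Int.cast_mul]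
        have he : idx + 1 - c = (idx + 1 - (c + 1)) + 1 := by omega
        rw [he, pow_succ]
        ring

lemma foldl_Q {α : Type} (Knat : Nat) (body : List Int → α → List Int) (g : α → Nat → R9) (l : List α)
    (hstep : ∀ (res : List Int) (f : Nat → R9) (x : α), x ∈ l →
      QInv Knat res f → QInv Knat (body res x) (fun idx => f idx + g x idx)) :
    ∀ (res : List Int) (f : Nat → R9), QInv Knat res f →
      QInv Knat (l.foldl body res) (fun idx => f idx + (l.map (fun x => g x idx)).sum) := by
  induction l with
  | nil => intro res f hq; exact QInv_congr (fun idx => by simp) hq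
  | cons x l ih =>
    intro res f hq
    have h1 := hstep res f x (by simp) hq
    have h2 := ih (fun res f x hx => hstep res f x (by simp [hx])) (body res x) _ h1
    refine QInv_congr (fun idx => ?_) h2
    simp [add_assoc]

lemma solve_eq_map (n k : Int) (nums : List Int) :
    solve n k nums = (PySem.List.pyRange 1 (k + 1) 1).map
      (fun p => Abig n nums p.toNat % 998244353) := rfl

-- ===== VERDICT =====
theorem solve_spec : Claim_equal_solve := by
  intro n k nums hdom hpre
  unfold Spec_solve
  rcases lt_or_ge k 1 with hk | hk
  · have h0 : (if k > 0 then k else 0) = 0 := by split <;> omega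
    have hnil : PySem.List.pyRange 1 (k + 1) 1 = [] :=
      PySem.List.pyRange_one_eq_nil (by omega)
    simp [solve, solve_alt, hnil, h0]
  · have hK : (if k > 0 then k else 0) = k := if_pos (by omega)
    have hKnz : ¬ (k = 0) := by omega
    have hkk : ((k.toNat : Int)) = k := Int.toNat_of_nonneg (by omega)
    have hpair : ∀ (i j : Int) (res : List Int) (f : Nat → R9), QInv k.toNat res f →
        QInv k.toNat
          (((PySem.List.pyRange 0 k 1).foldl
            (fun (st : Int × List Int) idx =>
              (st.1 * ((PySem.List.pyGetD nums i 0 + PySem.List.pyGetD nums j 0) % 998244353) % 998244353,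
               PySem.List.pySetD st.2 idx
                ((PySem.List.pyGetD st.2 idx 0
                  + st.1 * ((PySem.List.pyGetD nums i 0 + PySem.List.pyGetD nums j 0) % 998244353) % 998244353) % 998244353)))
            (1, res)).2)
          (fun idx => f idx
            + (((PySem.List.pyGetD nums i 0 + PySem.List.pyGetD nums j 0) % 998244353 : Int) : R9) ^ (idx + 1)) := by
      intro i j res f hq
      obtain ⟨l1, l2, l3⟩ := inner_fill k.toNat
        ((PySem.List.pyGetD nums i 0 + PySem.List.pyGetD nums j 0) % 998244353)
        k.toNat 0 1 res (by omega) hq.1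
      rw [show ((0 : Nat) : Int) = (0 : Int) from rfl, hkk] at l1 l3
      refine ⟨l1, fun idx hidx => ?_⟩
      obtain ⟨b1, b2, b3⟩ := l3 idx (by omega) hidx
      refine ⟨b1, b2, ?_⟩
      rw [b3, (hq.2 idx hidx).2.2]
      simp
    have hQfin : QInv k.toNat
        ((PySem.List.pyRange 0 n 1).foldl (fun res i =>
          (PySem.List.pyRange (i + 1) n 1).foldl (fun res j =>
            ((PySem.List.pyRange 0 k 1).foldl
              (fun (st : Int × List Int) idx =>
                (st.1 * ((PySem.List.pyGetD nums i 0 + PySem.List.pyGetD nums j 0) % 998244353) % 998244353,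
                 PySem.List.pySetD st.2 idx
                  ((PySem.List.pyGetD st.2 idx 0
                    + st.1 * ((PySem.List.pyGetD nums i 0 + PySem.List.pyGetD nums j 0) % 998244353) % 998244353) % 998244353)))
              (1, res)).2)
            res)
          (List.replicate k.toNat 0))
        (fun idx => 0 + ((PySem.List.pyRange 0 n 1).map (fun i =>
          ((PySem.List.pyRange (i + 1) n 1).map (fun j =>
            (((PySem.List.pyGetD nums i 0 + PySem.List.pyGetD nums j 0) % 998244353 : Int) : R9) ^ (idx + 1))).sum)).sum) := by
      refine foldl_Q k.toNat _ _ (PySem.List.pyRange 0 n 1)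
        (fun res f i _ hq => foldl_Q k.toNat _ _ (PySem.List.pyRange (i + 1) n 1)
          (fun res f j _ hq => hpair i j res f hq) res f hq)
        (List.replicate k.toNat 0) (fun _ => 0) ⟨by simp, fun idx hidx => ?_⟩
      have hik : (idx : Int) < k := by omega
      have hget : (List.replicate k.toNat (0 : Int)).getD idx 0 = 0 := by
        simp [List.getD_eq_getElem?_getD, hik]
      rw [hget]
      norm_num
    rw [solve_eq_map]
    simp only [solve_alt]
    rw [hK, if_neg hKnz]
    obtain ⟨hlenf, hentry⟩ := hQfin
    refine List.ext_getElem ?_ (fun idx h1 h2 => ?_)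
    · rw [List.length_map, PySem.List.length_pyRange_one, hlenf]
      omega
    · rw [List.getElem_map, PySem.List.getElem_pyRange_one]
      have hidxK : idx < k.toNat := by
        simp only [List.length_map, PySem.List.length_pyRange_one] at h1
        omega
      obtain ⟨b1, b2, b3⟩ := hentry idx hidxK
      have htn : ((1 + (idx : Int))).toNat = idx + 1 := by omega
      rw [htn]
      rw [← List.getD_eq_getElem _ 0 h2]
      have heq : Abig n nums (idx + 1) % 998244353 = _ := emod_eq_of_cast
        ((cast_Abig n nums (idx + 1)).trans (by rw [b3]; simp))
      rw [heq, Int.emod_eq_of_lt b1 b2]
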